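-- pv_equiv track=rewrite | github.com/Tmzpanda/leetcode | recursion appendix.py | insertStar
-- ===== SOURCE A (Python) =====
-- def insertStar(string):
--     output = ""
--     for i in range(len(string)):
--         if i > 0 and string[i] != string[i - 1]:
--             output += '*' + string[i]
--         else:
--             output +=  string[i]
--
--     return output
-- ===== SOURCE B (Python) =====
-- from itertools import groupby
--
--
-- def insertStar(string):
--     return '*'.join(''.join(g) for _, g in groupby(string))
-- ===== Notes on version B (the rewrite author's own statement) =====
-- stated objective: idiomatic
-- what changed: B splits the string into maximal runs of equal characters with itertools.groupby and joins the runs with a star separator, replacing A's indexed per-character loop that compares each character with its predecessor.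
import Mathlib
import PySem

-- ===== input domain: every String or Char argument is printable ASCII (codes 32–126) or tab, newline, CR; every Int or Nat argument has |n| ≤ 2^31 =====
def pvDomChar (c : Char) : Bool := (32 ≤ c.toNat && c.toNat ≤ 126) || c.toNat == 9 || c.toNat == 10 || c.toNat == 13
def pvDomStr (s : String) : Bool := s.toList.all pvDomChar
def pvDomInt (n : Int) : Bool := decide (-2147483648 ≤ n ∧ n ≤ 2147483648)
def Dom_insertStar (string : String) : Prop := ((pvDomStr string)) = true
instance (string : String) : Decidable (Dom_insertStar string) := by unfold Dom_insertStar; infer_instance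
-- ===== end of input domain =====

-- B replaces A's indexed predecessor-comparing loop by splitting the string into
-- maximal runs of equal characters (itertools.groupby) joined with '*' (idiomatic).

-- ===== PORT A =====
-- A iterates i over range(len(string)); indices are always in range and non-negative,
-- so List.range / List.getD here are exact for Python's range/indexing on this loop.
def insertStarStep (cs : List Char) (output : List Char) (i : Nat) : List Char :=
  if 0 < i ∧ cs.getD i ' ' ≠ cs.getD (i - 1) ' ' then output ++ ['*', cs.getD i ' ']
  else output ++ [cs.getD i ' ']

def insertStar (string : String) : String :=
  String.mk ((List.range string.toList.length).foldl (insertStarStep string.toList) [])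

-- ===== PORT B =====
-- pvRuns is the port of itertools.groupby on a string: the maximal runs of equal
-- consecutive characters, in order.
def pvRuns : List Char → List (List Char)
  | [] => []
  | c :: rest =>
    match pvRuns rest with
    | [] => [[c]]
    | r :: rs => if r.head? = some c then (c :: r) :: rs else [c] :: r :: rs

def insertStar_alt (string : String) : String :=
  String.mk (List.intercalate ['*'] (pvRuns string.toList))

-- ===== PRECONDITION & SPEC =====
def Spec_insertStar (string : String) (out : String) : Prop := out = insertStar_alt string
instance (string : String) (out : String) : Decidable (Spec_insertStar string out) := by unfold Spec_insertStar; infer_instance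

-- ===== CLAIM (what is proved, stated in full; the proofs are below) =====
def Claim_equal_insertStar : Prop := ∀ (string : String), Dom_insertStar string → Spec_insertStar string (insertStar string)

-- ===== LEMMAS AND PROOFS =====

-- Intermediate description of A's output: first char kept, then each char is
-- prefixed by '*' iff it differs from its predecessor.
def pvTail (p : Char) : List Char → List Char
  | [] => []
  | c :: rest => (if c ≠ p then ['*', c] else [c]) ++ pvTail c rest

def pvG : List Char → List Char
  | [] => []
  | c :: rest => c :: pvTail c rest

theorem pvTail_append (xs : List Char) : ∀ (p c : Char),
    pvTail p (xs ++ [c]) =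
      pvTail p xs ++ (if c ≠ (p :: xs).getLast (by simp) then ['*', c] else [c]) := by
  induction xs with
  | nil => intro p c; simp [pvTail]
  | cons x xs ih =>
    intro p c
    simp only [List.cons_append, pvTail, ih x c, List.append_assoc]
    congr 2

theorem pvG_append (xs : List Char) (c : Char) (h : xs ≠ []) :
    pvG (xs ++ [c]) =
      pvG xs ++ (if c ≠ xs.getLast h then ['*', c] else [c]) := by
  match xs with
  | d :: ds =>
    simp only [List.cons_append, pvG, pvTail_append, List.cons_append]

theorem pvFold_eq_pvG (cs : List Char) :
    (List.range cs.length).foldl (insertStarStep cs) [] = pvG cs := by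
  induction cs using List.reverseRecOn with
  | nil => simp [pvG]
  | append_singleton xs c ih =>
    have hlen : (xs ++ [c]).length = xs.length + 1 := by simp
    rw [hlen, List.range_succ, List.foldl_append]
    have hcongr : (List.range xs.length).foldl (insertStarStep (xs ++ [c])) [] =
        (List.range xs.length).foldl (insertStarStep xs) [] := by
      apply PySem.List.foldl_congr_mem
      intro acc i hi
      have hi' : i < xs.length := List.mem_range.mp hi
      unfold insertStarStep
      have h1 : (xs ++ [c]).getD i ' ' = xs.getD i ' ' := by
        simp [List.getD, List.getElem?_append_left hi']
      have h2 : (xs ++ [c]).getD (i - 1) ' ' = xs.getD (i - 1) ' ' := by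
        have : i - 1 < xs.length := lt_of_le_of_lt (Nat.sub_le i 1) hi'
        simp [List.getD, List.getElem?_append_left this]
      rw [h1, h2]
    rw [hcongr, ih]
    simp only [List.foldl_cons, List.foldl_nil]
    unfold insertStarStep
    have hc : (xs ++ [c]).getD xs.length ' ' = c := by
      simp [List.getD]
    cases xs with
    | nil => simp [pvG, pvTail]
    | cons x xs' =>
      have hne : (x :: xs') ≠ ([] : List Char) := by simp
      have hprev : ((x :: xs') ++ [c]).getD ((x :: xs').length - 1) ' ' =
          (x :: xs').getLast hne := by
        have hlt : (x :: xs').length - 1 < (x :: xs').length := by simp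
        simp only [List.getD, List.getElem?_append_left hlt]
        rw [List.getLast_eq_getElem]
        simp
        rfl
      rw [pvG_append (x :: xs') c hne]
      rw [hc, hprev]
      by_cases hcc : c = (x :: xs').getLast hne
      · simp [hcc]
      · simp [hcc]

theorem pvRuns_cons (c : Char) (t : List Char) :
    ∃ r rs, pvRuns (c :: t) = (c :: r) :: rs := by
  simp only [pvRuns]
  match h : pvRuns t with
  | [] => exact ⟨[], [], rfl⟩
  | r :: rs =>
    by_cases hh : r.head? = some c
    · match r, hh with
      | a :: r', hh =>
        simp only [List.head?_cons, Option.some.injEq] at hh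
        subst hh
        exact ⟨a :: r', rs, by simp⟩
    · exact ⟨[], r :: rs, by simp [hh]⟩

theorem intercalate_cons_head (sep u : List Char) (rs : List (List Char)) (p : Char) :
    List.intercalate sep ((p :: u) :: rs) = p :: List.intercalate sep (u :: rs) := by
  cases rs <;> simp [List.intercalate, List.intersperse]

theorem pvRuns_eq_pvTail (cs : List Char) : ∀ (p : Char),
    List.intercalate ['*'] (pvRuns (p :: cs)) = p :: pvTail p cs := by
  induction cs with
  | nil => intro p; simp [pvRuns, pvTail, List.intercalate]
  | cons c rest ih =>
    intro p
    obtain ⟨r, rs, hr⟩ := pvRuns_cons c rest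
    have hIH : List.intercalate ['*'] ((c :: r) :: rs) = c :: pvTail c rest := by
      rw [← hr]; exact ih c
    show List.intercalate ['*'] (pvRuns (p :: c :: rest)) = _
    conv_lhs => rw [pvRuns, hr]
    simp only [List.head?_cons]
    by_cases hpc : c = p
    · rw [if_pos (by rw [hpc])]
      subst hpc
      rw [intercalate_cons_head, hIH]
      simp [pvTail]
    · rw [if_neg (by simp [hpc])]
      have h2 : List.intercalate ['*'] ([p] :: (c :: r) :: rs) =
          p :: '*' :: List.intercalate ['*'] ((c :: r) :: rs) := by
        simp [List.intercalate, List.intersperse]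
      rw [h2, hIH]
      simp [pvTail, hpc]

theorem pvIntercalate_runs_eq_pvG (cs : List Char) :
    List.intercalate ['*'] (pvRuns cs) = pvG cs := by
  cases cs with
  | nil => simp [pvRuns, pvG, List.intercalate]
  | cons c rest => rw [pvRuns_eq_pvTail rest c]; rfl

-- ===== VERDICT (by name: the statement is the Claim_ definition above) =====
theorem insertStar_spec : Claim_equal_insertStar := by
  intro s _
  show insertStar s = insertStar_alt s
  unfold insertStar insertStar_alt
  rw [pvFold_eq_pvG, pvIntercalate_runs_eq_pvG]
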